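-- pv_equiv track=rewrite | github.com/Clichong/MLP | mlp_models/cycle_mlp.py | shiftlist
-- ===== SOURCE A (Python) =====
-- def shiftlist(pad, hidden_dim):
--     x_shift = [shift for shift in range(-pad, pad + 1)]
--     x_r_shift = [shift for shift in range(pad - 1, -pad, -1)]
--     x_list = x_shift + x_r_shift
--     n = hidden_dim // len(x_list) + 1
--     x_list = x_list * n
--     x_list = x_list[:hidden_dim]
--     return x_list
-- ===== SOURCE B (Python) =====
-- def shiftlist(pad, hidden_dim):
--     # periodic triangular wave: period p = 4*pad (p = 1 when pad == 0),
--     # value at phase j is j - pad on the rising half, 3*pad - j on the falling half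
--     p = 4 * pad or 1
--     out = []
--     for i in range(hidden_dim):
--         j = i % p
--         out.append(j - pad if j <= 2 * pad else 3 * pad - j)
--     return out
-- ===== Notes on version B (the rewrite author's own statement) =====
-- stated objective: alternative
-- what changed: Instead of concatenating two ranges, tiling the base list with '*n' and slicing off the overshoot, B computes each output element directly from its index by the closed-form triangular-wave formula j = i % (4*pad or 1), value j - pad if j <= 2*pad else 3*pad - j, avoiding the intermediate base list, the over-allocated tiled copy and the slice copy.
import Mathlib
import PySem

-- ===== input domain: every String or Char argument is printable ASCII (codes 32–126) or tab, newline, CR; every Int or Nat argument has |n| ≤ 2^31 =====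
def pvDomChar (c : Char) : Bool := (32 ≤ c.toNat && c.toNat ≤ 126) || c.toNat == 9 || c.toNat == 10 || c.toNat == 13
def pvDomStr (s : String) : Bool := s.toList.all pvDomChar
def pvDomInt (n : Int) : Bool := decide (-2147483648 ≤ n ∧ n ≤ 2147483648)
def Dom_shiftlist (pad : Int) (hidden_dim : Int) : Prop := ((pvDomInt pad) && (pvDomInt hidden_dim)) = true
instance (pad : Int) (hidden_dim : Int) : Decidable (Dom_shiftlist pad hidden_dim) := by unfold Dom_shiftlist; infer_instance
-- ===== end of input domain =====

-- B replaces A's build-tile-truncate of the cyclic shift list by a per-index closed-form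
-- triangular-wave computation (alternative decomposition, same cost).


-- ===== PORT A =====
-- Literal port of A.  'hidden_dim // len(x_list)' raises ZeroDivisionError in Python when
-- x_list is empty (exactly when pad < 0); those inputs are excluded by Pre_shiftlist below.
def shiftlist (pad : Int) (hidden_dim : Int) : List Int :=
  let x_shift := PySem.List.pyRange (-pad) (pad + 1) 1
  let x_r_shift := PySem.List.pyRange (pad - 1) (-pad) (-1)
  let x_list := x_shift ++ x_r_shift
  let n := PySem.Int.floordiv hidden_dim (x_list.length : Int) + 1
  let x_list2 := PySem.List.pyRepeat x_list n
  PySem.List.slice x_list2 none (some hidden_dim)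

-- ===== PORT B =====
def shiftlist_alt (pad : Int) (hidden_dim : Int) : List Int :=
  let p := if 4 * pad ≠ 0 then 4 * pad else 1   -- Python '4 * pad or 1'
  (PySem.List.pyRange 0 hidden_dim 1).foldl
    (fun out i =>
      let j := PySem.Int.mod i p
      out ++ [if j ≤ 2 * pad then j - pad else 3 * pad - j]) []

-- ===== PRECONDITION & SPEC =====
-- Pre_ excludes exactly pad < 0, where Python A raises ZeroDivisionError (empty base list).
def Pre_shiftlist (pad : Int) (hidden_dim : Int) : Prop := 0 ≤ pad
instance (pad : Int) (hidden_dim : Int) : Decidable (Pre_shiftlist pad hidden_dim) := by unfold Pre_shiftlist; infer_instance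
def pvWitness_shiftlist : Int × Int := (2, 10)

def Spec_shiftlist (pad : Int) (hidden_dim : Int) (out : List Int) : Prop := out = shiftlist_alt pad hidden_dim
instance (pad : Int) (hidden_dim : Int) (out : List Int) : Decidable (Spec_shiftlist pad hidden_dim out) := by unfold Spec_shiftlist; infer_instance

-- ===== CLAIM (what is proved, stated in full; the proofs are below) =====
def Claim_equal_shiftlist : Prop := ∀ (pad : Int) (hidden_dim : Int), Dom_shiftlist pad hidden_dim → Pre_shiftlist pad hidden_dim → Spec_shiftlist pad hidden_dim (shiftlist pad hidden_dim)

-- ===== LEMMAS AND PROOFS =====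

-- length of A's base list (pad ≥ 0): 1 when pad = 0, else 4*pad
lemma base_length (pad : Int) (hpad : 0 ≤ pad) :
    (((PySem.List.pyRange (-pad) (pad + 1) 1 ++ PySem.List.pyRange (pad - 1) (-pad) (-1)).length : Nat) : Int)
      = if pad = 0 then 1 else 4 * pad := by
  simp only [List.length_append, PySem.List.length_pyRange_one, PySem.List.length_pyRange_neg_one]
  split <;> omega

-- the base list element at index k is the triangular-wave value at phase k
lemma base_getElem (pad : Int) (hpad : 0 ≤ pad) (k : Nat)
    (hk : (k : Int) < if pad = 0 then 1 else 4 * pad) :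
    (PySem.List.pyRange (-pad) (pad + 1) 1 ++ PySem.List.pyRange (pad - 1) (-pad) (-1))[k]?
      = some (if (k : Int) ≤ 2 * pad then (k : Int) - pad else 3 * pad - (k : Int)) := by
  rw [PySem.List.pyRange_one, PySem.List.pyRange_neg_one]
  by_cases hl : k < ((pad + 1 - -pad).toNat)
  · rw [List.getElem?_append_left (by simpa using hl)]
    rw [List.getElem?_map, List.getElem?_range hl]
    have hle : (k : Int) ≤ 2 * pad := by omega
    simp only [Option.map_some, if_pos hle, Option.some.injEq]
    omega
  · push Not at hl
    rw [List.getElem?_append_right (by simpa using hl)]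
    simp only [List.length_map, List.length_range]
    have hk' : k - (pad + 1 - -pad).toNat < (pad - 1 - -pad).toNat := by
      rcases (by split at hk <;> omega : pad ≠ 0 ∧ (k : Int) < 4 * pad) with ⟨h0, h4⟩
      omega
    rw [List.getElem?_map, List.getElem?_range hk']
    have hgt : ¬ (k : Int) ≤ 2 * pad := by omega
    simp only [Option.map_some, if_neg hgt, Option.some.injEq]
    omega

-- indexing a flattened replicate: position k reads the base at phase k % length
lemma flatten_replicate_getElem {α : Type} (xs : List α) (m k : Nat) (hk : k < m * xs.length) :
    (List.replicate m xs).flatten[k]? = xs[k % xs.length]? := by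
  induction m generalizing k with
  | zero => omega
  | succ m ih =>
    rw [List.replicate_succ, List.flatten_cons]
    by_cases h : k < xs.length
    · rw [List.getElem?_append_left h, Nat.mod_eq_of_lt h]
    · push Not at h
      rw [Nat.succ_mul] at hk
      rw [List.getElem?_append_right h, ih (k - xs.length) (by omega)]
      congr 1
      conv_rhs => rw [show k = xs.length + (k - xs.length) by omega]
      rw [Nat.add_mod_left]

-- slicing the empty list gives the empty list
lemma slice_nil_to (b : Int) : PySem.List.slice ([] : List Int) none (some b) = [] := by
  rcases le_or_gt 0 b with hb | hb
  · rw [PySem.List.slice_to _ hb]; simp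
  · have : b = -(((-b).toNat : Nat) : Int) := by omega
    rw [this, PySem.List.slice_to_neg_natCast _ _ (by omega)]; simp

-- B's loop as a map over the index range
lemma alt_eq_map (pad : Int) (hidden_dim : Int) :
    shiftlist_alt pad hidden_dim
      = (PySem.List.pyRange 0 hidden_dim 1).map (fun i =>
          if PySem.Int.mod i (if 4 * pad ≠ 0 then 4 * pad else 1) ≤ 2 * pad
          then PySem.Int.mod i (if 4 * pad ≠ 0 then 4 * pad else 1) - pad
          else 3 * pad - PySem.Int.mod i (if 4 * pad ≠ 0 then 4 * pad else 1)) := by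
  simp only [shiftlist_alt]
  rw [PySem.List.foldl_append_singleton_eq_map]
  simp

-- ===== VERDICT (by name: the statement is the Claim_ definition above) =====
theorem shiftlist_spec : Claim_equal_shiftlist := by
  intro pad h _ hpre
  unfold Pre_shiftlist at hpre
  unfold Spec_shiftlist
  set base := PySem.List.pyRange (-pad) (pad + 1) 1 ++ PySem.List.pyRange (pad - 1) (-pad) (-1) with hbase
  have hlen : ((base.length : Nat) : Int) = if pad = 0 then 1 else 4 * pad := base_length pad hpre
  have hLpos : 0 < base.length := by by_cases h0 : pad = 0 <;> simp [h0] at hlen <;> omega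
  have hp : (if 4 * pad ≠ 0 then 4 * pad else 1) = ((base.length : Nat) : Int) := by
    by_cases h0 : pad = 0 <;> simp [h0] at hlen ⊢ <;> omega
  set n := PySem.Int.floordiv h (base.length : Int) + 1 with hn
  rw [alt_eq_map]
  show PySem.List.slice (PySem.List.pyRepeat base n) none (some h) = _
  rcases lt_or_ge h 0 with hneg | hpos
  · -- hidden_dim < 0: both sides are empty
    have hfd : PySem.Int.floordiv h (base.length : Int) < 0 :=
      (PySem.Int.floordiv_lt_iff_lt_mul (by exact_mod_cast hLpos)).mpr (by omega)
    have hn0 : n.toNat = 0 := by omega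
    rw [PySem.List.pyRange_one_eq_nil (by omega)]
    simp only [List.map_nil, PySem.List.pyRepeat, hn0, List.replicate_zero, List.flatten_nil]
    exact slice_nil_to h
  · -- 0 ≤ hidden_dim
    have hfd : 0 ≤ PySem.Int.floordiv h (base.length : Int) :=
      (PySem.Int.le_floordiv_iff_mul_le (by exact_mod_cast hLpos)).mpr (by omega)
    have hmod := PySem.Int.mod_lt h (b := (base.length : Int)) (by exact_mod_cast hLpos)
    have hdiv := PySem.Int.floordiv_mul_add_mod h (base.length : Int)
    have hcover : h.toNat ≤ n.toNat * base.length := by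
      have h1 : h ≤ n * (base.length : Int) := by rw [hn]; nlinarith [hdiv, hmod]
      have h3 : ((n.toNat * base.length : Nat) : Int) = n * (base.length : Int) := by
        push_cast [Int.toNat_of_nonneg (show (0:Int) ≤ n by omega)]; ring
      omega
    rw [PySem.List.slice_to _ hpos, PySem.List.pyRange_one]
    simp only [sub_zero, List.map_map]
    apply List.ext_getElem?
    intro k
    by_cases hk : k < h.toNat
    · rw [List.getElem?_take_of_lt hk, PySem.List.pyRepeat,
          flatten_replicate_getElem base n.toNat k (by omega),
          List.getElem?_map, List.getElem?_range hk,
          base_getElem pad hpre (k % base.length)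
            (by rw [← hlen]; exact_mod_cast Nat.mod_lt k hLpos)]
      simp only [Function.comp_apply, Option.map_some, hp, zero_add,
        PySem.Int.mod_natCast]
    · push Not at hk
      rw [List.getElem?_eq_none (by simp [List.length_take]; omega),
          List.getElem?_eq_none (by simpa using hk)]
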